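-- pv_equiv track=rewrite | github.com/skiller-whale/algorithms-in-python | big_o_complexity/exercise_2.py | check_min_divides_product
-- ===== SOURCE A (Python) =====
-- def min(number_list):
--     min_val = number_list[0]
--     for el in number_list:
--         if el < min_val:
--             min_val = el
--     return min_val
--
-- def get_product(number_list, i, j):
--     return number_list[i] * number_list[j]
--
-- def get_row_product(number_list, i):
--     N = len(number_list)
--     total = 0
--     for j in range(N):
--         total += get_product(number_list, i, j)
--     return total
--
-- def check_min_divides_product(number_list):
--     N = len(number_list)
--     min_el = min(number_list)
--     total = 0
--     for i in range(N):
--         total += get_row_product(number_list, i)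
--     if total % min_el == 0:
--         return True
--     return False
-- ===== SOURCE B (Python) =====
-- def check_min_divides_product(number_list):
--     s = sum(number_list)
--     return s * s % min(number_list) == 0
-- ===== Notes on version B (the rewrite author's own statement) =====
-- stated objective: faster
-- what changed: Replaces the O(N^2) double loop over all pairwise products by the identity sum_{i,j} a_i*a_j = (sum a)^2: one pass computes the sum, then one squaring and one modulo by the minimum.
import Mathlib
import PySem

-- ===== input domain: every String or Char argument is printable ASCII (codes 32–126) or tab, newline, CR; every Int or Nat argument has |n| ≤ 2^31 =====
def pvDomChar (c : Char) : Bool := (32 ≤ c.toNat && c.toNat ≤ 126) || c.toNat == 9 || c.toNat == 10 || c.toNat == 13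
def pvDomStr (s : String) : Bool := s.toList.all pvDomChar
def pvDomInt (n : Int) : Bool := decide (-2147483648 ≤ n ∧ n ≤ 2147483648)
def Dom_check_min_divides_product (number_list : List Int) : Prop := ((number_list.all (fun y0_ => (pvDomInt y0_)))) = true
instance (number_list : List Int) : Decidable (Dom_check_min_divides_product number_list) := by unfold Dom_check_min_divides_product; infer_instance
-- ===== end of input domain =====

-- B replaces A's O(N^2) double loop by the identity Σ_{i,j} a_i·a_j = (Σ a)^2: one pass for the sum, then square and mod min.

-- ===== PORT A =====
-- A's module-level 'min': starts at number_list[0], scans the whole list (headD 0 is unreachable: Pre_ excludes [])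
def pyMinA (number_list : List Int) : Int :=
  number_list.foldl (fun min_val el => if el < min_val then el else min_val) (number_list.headD 0)

-- indices produced by range(N) are always in range, so pyGetD … 0 is exact there
def pyGetProduct (number_list : List Int) (i j : Int) : Int :=
  PySem.List.pyGetD number_list i 0 * PySem.List.pyGetD number_list j 0

def pyGetRowProduct (number_list : List Int) (i : Int) : Int :=
  (PySem.List.pyRange 0 (number_list.length : Int) 1).foldl
    (fun total j => total + pyGetProduct number_list i j) 0

def check_min_divides_product (number_list : List Int) : Bool :=
  let min_el := pyMinA number_list
  let total := (PySem.List.pyRange 0 (number_list.length : Int) 1).foldl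
    (fun total i => total + pyGetRowProduct number_list i) 0
  if PySem.Int.mod total min_el = 0 then true else false

-- ===== PORT B =====
def check_min_divides_product_alt (number_list : List Int) : Bool :=
  match PySem.List.min? number_list (fun x => x) with
  | none => false   -- unreachable under Pre_ ([] excluded); Source B's min([]) raises
  | some m =>
    let s := number_list.foldl (· + ·) 0
    decide (PySem.Int.mod (s * s) m = 0)

-- ===== PRECONDITION & SPEC =====
-- A raises IndexError on [] and ZeroDivisionError when the minimum is 0 (i.e. 0 is in the list and no element is negative)
def Pre_check_min_divides_product (number_list : List Int) : Prop :=
  number_list ≠ [] ∧ ((0 : Int) ∉ number_list ∨ ∃ x ∈ number_list, x < 0)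
instance (number_list : List Int) : Decidable (Pre_check_min_divides_product number_list) := by
  unfold Pre_check_min_divides_product; infer_instance
def pvWitness_check_min_divides_product : List Int := [3, 1, 2]

def Spec_check_min_divides_product (number_list : List Int) (out : Bool) : Prop := out = check_min_divides_product_alt number_list
instance (number_list : List Int) (out : Bool) : Decidable (Spec_check_min_divides_product number_list out) := by unfold Spec_check_min_divides_product; infer_instance

-- ===== CLAIM (what is proved, stated in full; the proofs are below) =====
def Claim_equal_check_min_divides_product : Prop := ∀ (number_list : List Int), Dom_check_min_divides_product number_list → Pre_check_min_divides_product number_list → Spec_check_min_divides_product number_list (check_min_divides_product number_list)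

-- ===== LEMMAS AND PROOFS =====

-- A's running-minimum update is the binary 'min'
theorem foldl_ifmin_eq_foldl_min (t : List Int) (x : Int) :
    t.foldl (fun min_val el => if el < min_val then el else min_val) x = t.foldl min x := by
  induction t generalizing x with
  | nil => rfl
  | cons a t ih =>
    simp only [List.foldl_cons]
    rw [ih]
    congr 1
    by_cases h : a < x
    · simp [h, le_of_lt h]
    · have : x ≤ a := le_of_not_gt h
      simp [h, this]

theorem pyMinA_eq_min? (x : Int) (t : List Int) :
    PySem.List.min? (x :: t) (fun y => y) = some (pyMinA (x :: t)) := by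
  rw [PySem.List.min?_id_cons]
  unfold pyMinA
  simp only [List.headD_cons, List.foldl_cons]
  rw [foldl_ifmin_eq_foldl_min]
  congr 1
  simp

theorem foldl_add_shift (l : List Int) (a : Int) :
    l.foldl (· + ·) a = a + l.foldl (· + ·) 0 := by
  induction l generalizing a with
  | nil => simp
  | cons x t ih =>
    simp only [List.foldl_cons]
    rw [ih, ih (0 + x)]
    ring

theorem foldl_add_mul (c : Int) (l : List Int) (a : Int) :
    l.foldl (fun t v => t + c * v) a = a + c * l.foldl (· + ·) 0 := by
  induction l generalizing a with
  | nil => simp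
  | cons x t ih =>
    simp only [List.foldl_cons]
    rw [ih, foldl_add_shift t (0 + x)]
    ring

theorem foldl_add_mul' (c : Int) (l : List Int) (a : Int) :
    l.foldl (fun t v => t + v * c) a = a + l.foldl (· + ·) 0 * c := by
  induction l generalizing a with
  | nil => simp
  | cons x t ih =>
    simp only [List.foldl_cons]
    rw [ih, foldl_add_shift t (0 + x)]
    ring

theorem row_product_eq (l : List Int) (i : Int) :
    pyGetRowProduct l i = PySem.List.pyGetD l i 0 * l.foldl (· + ·) 0 := by
  unfold pyGetRowProduct pyGetProduct
  rw [PySem.List.foldl_pyRange_zero_pyGetD' l 0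
        (fun t v => t + PySem.List.pyGetD l i 0 * v) 0]
  rw [foldl_add_mul]
  ring

theorem total_eq_sq (l : List Int) :
    (PySem.List.pyRange 0 (l.length : Int) 1).foldl
      (fun total i => total + pyGetRowProduct l i) 0
    = l.foldl (· + ·) 0 * l.foldl (· + ·) 0 := by
  have h : ∀ total i, total + pyGetRowProduct l i
      = total + PySem.List.pyGetD l i 0 * l.foldl (· + ·) 0 := by
    intro total i; rw [row_product_eq]
  simp only [h]
  rw [PySem.List.foldl_pyRange_zero_pyGetD' l 0
        (fun t v => t + v * l.foldl (· + ·) 0) 0]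
  rw [foldl_add_mul']
  ring

-- ===== VERDICT (by name: the statement is the Claim_ definition above) =====
theorem check_min_divides_product_spec : Claim_equal_check_min_divides_product := by
  intro l _ hpre
  obtain ⟨hne, -⟩ := hpre
  obtain ⟨x, t, rfl⟩ := List.exists_cons_of_ne_nil hne
  unfold Spec_check_min_divides_product check_min_divides_product check_min_divides_product_alt
  rw [pyMinA_eq_min? x t]
  simp only [total_eq_sq]
  split_ifs with h
  · exact (decide_eq_true h).symm
  · exact (decide_eq_false h).symm
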